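-- pv_equiv track=rewrite | github.com/renglo/inca | package/inca/handlers/reducer.py | _build_questions
-- ===== SOURCE A (Python) =====
-- from typing import Any, Dict, List, Optional
--
-- def _build_questions(missing_paths: List[str]) -> str:
--     # ask up to 3
--     priorities = [
--         "itinerary.segments[0].origin.code",
--         "itinerary.segments[0].destination.code",
--         "itinerary.segments[0].depart_date",
--         "itinerary.segments[1].depart_date",
--         "party.travelers.adults",
--         "itinerary.lodging.check_in",
--         "itinerary.lodging.check_out",
--     ]
--     for i in range(2, 10):
--         priorities.extend([
--             f"itinerary.segments[{i}].origin.code",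
--             f"itinerary.segments[{i}].destination.code",
--             f"itinerary.segments[{i}].depart_date",
--         ])
--     for j in range(5):
--         priorities.extend([
--             f"itinerary.lodging.stays[{j}].location_code",
--             f"itinerary.lodging.stays[{j}].check_in",
--             f"itinerary.lodging.stays[{j}].check_out",
--         ])
--
--     ordered = sorted(missing_paths, key=lambda p: priorities.index(p) if p in priorities else 999)
--     top = ordered[:3]
--
--     qs: List[str] = []
--     for p in top:
--         if ".origin.code" in p:
--             qs.append("What airport/city are you departing from for this leg?")
--         elif ".destination.code" in p:
--             qs.append("What airport/city are you going to for this leg?")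
--         elif "segments[" in p and "depart_date" in p:
--             qs.append("What's the departure date for this leg?")
--         elif p.endswith("party.travelers.adults"):
--             qs.append("How many adult travelers?")
--         elif "lodging.check_in" in p or "lodging.check_out" in p or ("stays[" in p and "check_" in p):
--             qs.append("What are the hotel check-in and check-out dates?")
--         elif "stays[" in p and "location_code" in p:
--             qs.append("Which city/location for this hotel stay?")
--         elif p == "itinerary.segments":
--             qs.append("What airport/city are you departing from and going to, and what's the departure date?")
--         else:
--             qs.append(f"I’m missing: {p}. What should it be?")
--
--     return "\n".join(f"- {q}" for q in qs)
-- ===== SOURCE B (Python) =====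
-- from typing import List
--
-- def _build_questions(missing_paths: List[str]) -> str:
--     # ask up to 3
--     priorities = [
--         "itinerary.segments[0].origin.code",
--         "itinerary.segments[0].destination.code",
--         "itinerary.segments[0].depart_date",
--         "itinerary.segments[1].depart_date",
--         "party.travelers.adults",
--         "itinerary.lodging.check_in",
--         "itinerary.lodging.check_out",
--     ]
--     for i in range(2, 10):
--         priorities.extend([
--             f"itinerary.segments[{i}].origin.code",
--             f"itinerary.segments[{i}].destination.code",
--             f"itinerary.segments[{i}].depart_date",
--         ])
--     for j in range(5):
--         priorities.extend([
--             f"itinerary.lodging.stays[{j}].location_code",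
--             f"itinerary.lodging.stays[{j}].check_in",
--             f"itinerary.lodging.stays[{j}].check_out",
--         ])
--
--     # No sort: bucket-scan. Priority paths first, in priority order (duplicates kept),
--     # then the remaining paths in their original order — exactly the stable sort order.
--     ordered: List[str] = []
--     for q in priorities:
--         ordered.extend(p for p in missing_paths if p == q)
--     ordered.extend(p for p in missing_paths if p not in priorities)
--
--     qs: List[str] = []
--     for p in ordered[:3]:
--         if ".origin.code" in p:
--             qs.append("What airport/city are you departing from for this leg?")
--         elif ".destination.code" in p:
--             qs.append("What airport/city are you going to for this leg?")
--         elif "segments[" in p and "depart_date" in p: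
--             qs.append("What's the departure date for this leg?")
--         elif p.endswith("party.travelers.adults"):
--             qs.append("How many adult travelers?")
--         elif "lodging.check_in" in p or "lodging.check_out" in p or ("stays[" in p and "check_" in p):
--             qs.append("What are the hotel check-in and check-out dates?")
--         elif "stays[" in p and "location_code" in p:
--             qs.append("Which city/location for this hotel stay?")
--         elif p == "itinerary.segments":
--             qs.append("What airport/city are you departing from and going to, and what's the departure date?")
--         else:
--             qs.append(f"I’m missing: {p}. What should it be?")
--
--     return "\n".join(f"- {q}" for q in qs)
-- ===== Notes on version B (the rewrite author's own statement) =====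
-- stated objective: alternative
-- what changed: Replaced the stable sort by priority-index (with 999 sentinel) by a sort-free bucket scan: for each priority in order append the equal paths, then append the non-priority paths in input order, and take the first 3.
import Mathlib
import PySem

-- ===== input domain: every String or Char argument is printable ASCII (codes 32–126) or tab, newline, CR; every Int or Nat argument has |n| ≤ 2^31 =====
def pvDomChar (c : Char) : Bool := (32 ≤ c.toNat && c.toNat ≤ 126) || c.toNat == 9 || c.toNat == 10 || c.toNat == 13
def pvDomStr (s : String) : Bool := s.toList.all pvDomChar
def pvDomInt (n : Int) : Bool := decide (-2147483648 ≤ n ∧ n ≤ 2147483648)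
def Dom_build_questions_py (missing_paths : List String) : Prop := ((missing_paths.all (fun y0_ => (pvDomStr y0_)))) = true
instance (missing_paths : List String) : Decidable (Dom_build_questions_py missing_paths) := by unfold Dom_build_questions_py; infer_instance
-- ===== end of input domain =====

-- B replaces A's stable sort by priority index with a bucket scan over the constant priorities
-- list followed by the non-priority paths in input order (objective: alternative algorithm).

-- ===== PORT A =====
-- the `priorities` constant both Pythons build with the same literal + two extend loops
def pvPriorities : List String :=
  let priorities : List String := [
    "itinerary.segments[0].origin.code",
    "itinerary.segments[0].destination.code",
    "itinerary.segments[0].depart_date",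
    "itinerary.segments[1].depart_date",
    "party.travelers.adults",
    "itinerary.lodging.check_in",
    "itinerary.lodging.check_out"]
  let priorities := (PySem.List.pyRange 2 10 1).foldl (fun acc i =>
    acc ++ ["itinerary.segments[" ++ PySem.Int.toStr i ++ "].origin.code",
            "itinerary.segments[" ++ PySem.Int.toStr i ++ "].destination.code",
            "itinerary.segments[" ++ PySem.Int.toStr i ++ "].depart_date"]) priorities
  (PySem.List.pyRange 0 5 1).foldl (fun acc j =>
    acc ++ ["itinerary.lodging.stays[" ++ PySem.Int.toStr j ++ "].location_code",
            "itinerary.lodging.stays[" ++ PySem.Int.toStr j ++ "].check_in",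
            "itinerary.lodging.stays[" ++ PySem.Int.toStr j ++ "].check_out"]) priorities

-- A's sort key: lambda p: priorities.index(p) if p in priorities else 999
def pvKey (pri : List String) (p : String) : Int :=
  if p ∈ pri then (((PySem.List.index? pri p).getD 0 : Nat) : Int) else 999

-- the identical branch chain both Pythons map each path to its question with
def pvQuestion (p : String) : String :=
  if PySem.Str.isIn ".origin.code" p then
    "What airport/city are you departing from for this leg?"
  else if PySem.Str.isIn ".destination.code" p then
    "What airport/city are you going to for this leg?"
  else if PySem.Str.isIn "segments[" p && PySem.Str.isIn "depart_date" p then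
    "What's the departure date for this leg?"
  else if PySem.Str.endswith p "party.travelers.adults" then
    "How many adult travelers?"
  else if PySem.Str.isIn "lodging.check_in" p || PySem.Str.isIn "lodging.check_out" p
          || (PySem.Str.isIn "stays[" p && PySem.Str.isIn "check_" p) then
    "What are the hotel check-in and check-out dates?"
  else if PySem.Str.isIn "stays[" p && PySem.Str.isIn "location_code" p then
    "Which city/location for this hotel stay?"
  else if p == "itinerary.segments" then
    "What airport/city are you departing from and going to, and what's the departure date?"
  else
    "I’m missing: " ++ p ++ ". What should it be?"

def build_questions_py (missing_paths : List String) : String :=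
  let ordered := PySem.List.sorted missing_paths (pvKey pvPriorities)
  let top := PySem.List.slice ordered none (some 3)
  let qs : List String := top.foldl (fun qs p => qs ++ [pvQuestion p]) []
  PySem.Str.join "\n" (qs.map (fun q => "- " ++ q))

-- ===== PORT B =====
def build_questions_py_alt (missing_paths : List String) : String :=
  let ordered : List String :=
    pvPriorities.foldl (fun acc q => acc ++ missing_paths.filter (fun p => p == q)) []
  let ordered := ordered ++ missing_paths.filter (fun p => decide (p ∉ pvPriorities))
  let qs : List String :=
    (PySem.List.slice ordered none (some 3)).foldl (fun qs p => qs ++ [pvQuestion p]) []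
  PySem.Str.join "\n" (qs.map (fun q => "- " ++ q))

-- ===== PRECONDITION & SPEC =====
def Spec_build_questions_py (missing_paths : List String) (out : String) : Prop := out = build_questions_py_alt missing_paths
instance (missing_paths : List String) (out : String) : Decidable (Spec_build_questions_py missing_paths out) := by unfold Spec_build_questions_py; infer_instance

-- ===== CLAIM (what is proved, stated in full; the proofs are below) =====
def Claim_equal_build_questions_py : Prop := ∀ (missing_paths : List String), Dom_build_questions_py missing_paths → Spec_build_questions_py missing_paths (build_questions_py missing_paths)

-- ===== LEMMAS AND PROOFS =====

-- an element of a bucket ys.filter (· == q) is q itself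
lemma pv_mem_bucket {ys : List String} {q y : String}
    (h : y ∈ ys.filter (fun p => p == q)) : y = q := by
  have := (List.mem_filter.mp h).2
  exact eq_of_beq this

-- the first-occurrence index of a present element is below the length
lemma pv_index_getD_lt {pri : List String} {q : String} (hq : q ∈ pri) :
    (PySem.List.index? pri q).getD 0 < pri.length := by
  obtain ⟨j, hj⟩ := Option.isSome_iff_exists.mp ((PySem.List.index?_isSome_iff pri q).mpr hq)
  obtain ⟨pre, suf, hsp, hlen, -⟩ := (PySem.List.index?_eq_some_iff pri q j).mp hj
  rw [hj]
  subst hsp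
  simp [← hlen]

-- appending a path x touches no bucket of a priority list x is not in
lemma pv_flatMap_bucket_skip {x : String} (ys : List String) :
    ∀ (l : List String), x ∉ l →
    (l.flatMap fun q => (ys ++ [x]).filter (fun p => p == q)) =
      l.flatMap fun q => ys.filter (fun p => p == q) := by
  intro l hl
  induction l with
  | nil => simp
  | cons a t ih =>
    have hxa : (x == a) = false := by
      simp only [beq_eq_false_iff_ne, ne_eq]
      intro h; exact hl (by simp [h])
    have ht := ih (fun h => hl (List.mem_cons_of_mem a h))
    rw [List.flatMap_cons, List.flatMap_cons, ht]
    simp [List.filter_append, hxa]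

-- insertion skips a prefix it never goes before
lemma pv_insertBy_append_left (before : String → String → Bool) (x : String) :
    ∀ (as : List String) (bs : List String), (∀ a ∈ as, before x a = false) →
    PySem.List.insertBy before x (as ++ bs) = as ++ PySem.List.insertBy before x bs := by
  intro as bs h
  induction as with
  | nil => simp
  | cons a t ih =>
    have ha := h a List.mem_cons_self
    have ht := ih (fun a' ha' => h a' (List.mem_cons_of_mem a ha'))
    simp [PySem.List.insertBy, ha, ht]

-- insertion goes before everything it precedes
lemma pv_insertBy_all_before (before : String → String → Bool) (x : String) :
    ∀ (z : List String), (∀ y ∈ z, before x y = true) →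
    PySem.List.insertBy before x z = x :: z := by
  intro z h
  cases z with
  | nil => rfl
  | cons a t => simp [PySem.List.insertBy, h a List.mem_cons_self]

-- the stable sort by priority index IS the bucket scan
lemma pv_sorted_eq_buckets (pri : List String) (hnd : pri.Nodup) (hlen : pri.length < 999) :
    ∀ (xs : List String),
    PySem.List.sorted xs (pvKey pri) =
      (pri.flatMap fun q => xs.filter (fun p => p == q)) ++
        xs.filter (fun p => decide (p ∉ pri)) := by
  intro xs
  induction xs using List.reverseRecOn with
  | nil => simp [PySem.List.sorted_eq_foldl_insertBy]
  | append_singleton ys x ih =>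
    rw [PySem.List.sorted_eq_foldl_insertBy] at ih ⊢
    rw [List.foldl_append, List.foldl_cons, List.foldl_nil, ih]
    by_cases hx : x ∈ pri
    · -- x lands at the end of its own bucket
      obtain ⟨pre, suf, hsp⟩ := List.append_of_mem hx
      have hnd' : (pre ++ x :: suf).Nodup := hsp ▸ hnd
      rw [List.nodup_append] at hnd'
      obtain ⟨hndpre, hndxs, hdisj⟩ := hnd'
      have hxpre : x ∉ pre := fun h => hdisj x h x List.mem_cons_self rfl
      have hxsuf : x ∉ suf := by
        rw [List.nodup_cons] at hndxs; exact hndxs.1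
      have hkx : pvKey pri x = (pre.length : Int) := by
        have hix : PySem.List.index? pri x = some pre.length :=
          (PySem.List.index?_eq_some_iff pri x pre.length).mpr ⟨pre, suf, hsp, rfl, hxpre⟩
        unfold pvKey
        rw [if_pos hx, hix, Option.getD_some]
      -- keys strictly after x's bucket are strictly larger
      have hkey_suf : ∀ q ∈ suf, (pre.length : Int) < pvKey pri q := by
        intro q hq
        obtain ⟨j, hj⟩ := Option.isSome_iff_exists.mp ((PySem.List.index?_isSome_iff suf q).mpr hq)
        obtain ⟨a, b, hsufsp, hla, hqa⟩ := (PySem.List.index?_eq_some_iff suf q j).mp hj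
        have hqpri : q ∈ pri := by rw [hsp]; simp [hq]
        have hqpre : q ∉ pre := fun h => hdisj q h q (List.mem_cons_of_mem x hq) rfl
        have hqx : q ≠ x := fun h => hxsuf (h ▸ hq)
        have hidx : PySem.List.index? pri q = some (pre.length + 1 + j) := by
          apply (PySem.List.index?_eq_some_iff pri q _).mpr
          refine ⟨pre ++ x :: a, b, ?_, ?_, ?_⟩
          · rw [hsp, hsufsp]; simp
          · simp [← hla]; omega
          · intro h
            rcases List.mem_append.mp h with h | h
            · exact hqpre h
            · rcases List.mem_cons.mp h with h | h
              · exact hqx h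
              · exact hqa h
        unfold pvKey
        rw [if_pos hqpri, hidx, Option.getD_some]
        omega
      -- keys in buckets before x's are strictly smaller
      have hkey_pre : ∀ q ∈ pre, pvKey pri q < (pre.length : Int) := by
        intro q hq
        have hqpri : q ∈ pri := by rw [hsp]; simp [hq]
        have hidx : PySem.List.index? pri q = PySem.List.index? pre q := by
          rw [hsp]; exact PySem.List.index?_append_of_mem (x :: suf) hq
        have hlt := pv_index_getD_lt hq
        unfold pvKey
        rw [if_pos hqpri, hidx]
        omega
      have hrest : ∀ y ∈ ys.filter (fun p => decide (p ∉ pri)), pvKey pri y = 999 := by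
        intro y hy
        have : y ∉ pri := by simpa using (List.mem_filter.mp hy).2
        simp [pvKey, this]
      have hfx : (ys ++ [x]).filter (fun p => p == x) = ys.filter (fun p => p == x) ++ [x] := by
        simp [List.filter_append]
      have hfr : (ys ++ [x]).filter (fun p => decide (p ∉ pri)) =
          ys.filter (fun p => decide (p ∉ pri)) := by
        simp [List.filter_append, hx]
      have hR1 : (pri.flatMap fun q => (ys ++ [x]).filter (fun p => p == q)) =
          ((pre.flatMap fun q => ys.filter (fun p => p == q)) ++
            (ys.filter (fun p => p == x) ++ [x])) ++
          (suf.flatMap fun q => ys.filter (fun p => p == q)) := by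
        rw [hsp, List.flatMap_append, List.flatMap_cons,
            pv_flatMap_bucket_skip ys pre hxpre, pv_flatMap_bucket_skip ys suf hxsuf, hfx]
        simp [List.append_assoc]
      have hL1 : (pri.flatMap fun q => ys.filter (fun p => p == q)) =
          ((pre.flatMap fun q => ys.filter (fun p => p == q)) ++
            ys.filter (fun p => p == x)) ++
          (suf.flatMap fun q => ys.filter (fun p => p == q)) := by
        rw [hsp, List.flatMap_append, List.flatMap_cons]
        simp [List.append_assoc]
      have hskip : ∀ a ∈ (pre.flatMap fun q => ys.filter (fun p => p == q)) ++
          ys.filter (fun p => p == x),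
          (fun a b => decide (pvKey pri a < pvKey pri b)) x a = false := by
        intro a ha
        rcases List.mem_append.mp ha with ha | ha
        · obtain ⟨q, hq, hmem⟩ := List.mem_flatMap.mp ha
          have := pv_mem_bucket hmem
          subst this
          have := hkey_pre a hq
          simp only [hkx, decide_eq_false_iff_not, not_lt]
          omega
        · have := pv_mem_bucket ha
          subst this
          simp [hkx]
      have hall : ∀ y ∈ (suf.flatMap fun q => ys.filter (fun p => p == q)) ++
          ys.filter (fun p => decide (p ∉ pri)),
          (fun a b => decide (pvKey pri a < pvKey pri b)) x y = true := by
        intro y hy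
        rcases List.mem_append.mp hy with hy | hy
        · obtain ⟨q, hq, hmem⟩ := List.mem_flatMap.mp hy
          have := pv_mem_bucket hmem
          subst this
          have := hkey_suf y hq
          simp only [hkx, decide_eq_true_eq]
          omega
        · have := hrest y hy
          simp only [hkx, this, decide_eq_true_eq]
          have hpl : pri.length = pre.length + suf.length + 1 := by simp [hsp]; omega
          omega
      rw [hR1, hfr, hL1]
      have hre : (((pre.flatMap fun q => ys.filter (fun p => p == q)) ++
            ys.filter (fun p => p == x)) ++
          (suf.flatMap fun q => ys.filter (fun p => p == q))) ++
          ys.filter (fun p => decide (p ∉ pri)) =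
          ((pre.flatMap fun q => ys.filter (fun p => p == q)) ++
            ys.filter (fun p => p == x)) ++
          ((suf.flatMap fun q => ys.filter (fun p => p == q)) ++
            ys.filter (fun p => decide (p ∉ pri))) := by
        simp [List.append_assoc]
      rw [hre, pv_insertBy_append_left _ x _ _ hskip, pv_insertBy_all_before _ x _ hall]
      simp [List.append_assoc]
    · -- x is not a priority: it goes to the very end
      have hkx : pvKey pri x = 999 := by simp [pvKey, hx]
      have hnotbefore : ∀ y ∈ (pri.flatMap fun q => ys.filter (fun p => p == q)) ++
          ys.filter (fun p => decide (p ∉ pri)),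
          (fun a b => decide (pvKey pri a < pvKey pri b)) x y = false := by
        intro y hy
        simp only [hkx, decide_eq_false_iff_not, not_lt]
        rcases List.mem_append.mp hy with hy | hy
        · obtain ⟨q, hq, hmem⟩ := List.mem_flatMap.mp hy
          have := pv_mem_bucket hmem
          subst this
          have hlt := pv_index_getD_lt hq
          unfold pvKey
          rw [if_pos hq]
          omega
        · have : y ∉ pri := by simpa using (List.mem_filter.mp hy).2
          unfold pvKey
          rw [if_neg this]
      rw [PySem.List.insertBy_of_forall_not_before _ _ _ hnotbefore,
          pv_flatMap_bucket_skip ys pri hx]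
      have hfr : (ys ++ [x]).filter (fun p => decide (p ∉ pri)) =
          ys.filter (fun p => decide (p ∉ pri)) ++ [x] := by
        simp [List.filter_append, hx]
      rw [hfr]
      simp [List.append_assoc]

lemma pvPriorities_nodup : pvPriorities.Nodup := by decide

lemma pvPriorities_len : pvPriorities.length < 999 := by decide

-- ===== VERDICT (by name: the statement is the Claim_ definition above) =====
theorem build_questions_py_spec : Claim_equal_build_questions_py := by
  intro missing_paths _
  unfold Spec_build_questions_py build_questions_py build_questions_py_alt
  rw [PySem.List.foldl_append_eq_flatMap (fun q => missing_paths.filter (fun p => p == q))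
        pvPriorities []]
  rw [pv_sorted_eq_buckets pvPriorities pvPriorities_nodup pvPriorities_len missing_paths]
  simp
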